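-- pv_equiv track=rewrite | github.com/dasebaztian/dotfiles | micro/backups/%home%sebastian%Escuela%Web%samuel.py | generar_variantes
-- ===== SOURCE A (Python) =====
-- from itertools import product
--
-- def generar_variantes(cadena):
--     # Diccionario de caracteres a cambiar
--     cambios = {
--         'e': ['e', '3'],
--         'i': ['i', '1'],
--         'o': ['o', '0']
--     }
--
--     # Creamos una lista para almacenar las posibles variantes de cada caracter
--     opciones = []
--
--     # Recorremos la cadena y si encontramos 'e', 'i' o 'o', añadimos sus posibles reemplazos
--     for char in cadena:
--         if char in cambios:
--             opciones.append(cambios[char])  # Añadimos las opciones posibles (ej: ['e', '3'])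
--         else:
--             opciones.append([char])  # Si no es 'e', 'i' o 'o', se queda igual
--
--     # Usamos product para generar todas las combinaciones posibles
--     variantes = [''.join(variacion) for variacion in product(*opciones)]
--     return variantes
-- ===== SOURCE B (Python) =====
-- def generar_variantes(cadena):
--     # Count substitutable characters, then count in binary: each mask in
--     # range(2**m) selects, by its bits (MSB = leftmost substitutable position),
--     # which of the m characters get replaced.
--     m = 0
--     for ch in cadena:
--         if ch in 'eio':
--             m += 1
--     out = []
--     for mask in range(2 ** m):
--         bits = m
--         piece = []
--         for ch in cadena:
--             if ch in 'eio':
--                 bits -= 1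
--                 if mask // 2 ** bits % 2:
--                     piece.append('3' if ch == 'e' else '1' if ch == 'i' else '0')
--                 else:
--                     piece.append(ch)
--             else:
--                 piece.append(ch)
--         out.append(''.join(piece))
--     return out
-- ===== Notes on version B (the rewrite author's own statement) =====
-- stated objective: alternative
-- what changed: Replaces the cartesian-product construction (itertools.product over a precomputed list of per-character option lists) by binary counting: B counts the substitutable characters (m), then for each mask in range(2**m) rewrites the string once, using the mask's bits (MSB = leftmost substitutable position) to decide which characters to replace.
import Mathlib
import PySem

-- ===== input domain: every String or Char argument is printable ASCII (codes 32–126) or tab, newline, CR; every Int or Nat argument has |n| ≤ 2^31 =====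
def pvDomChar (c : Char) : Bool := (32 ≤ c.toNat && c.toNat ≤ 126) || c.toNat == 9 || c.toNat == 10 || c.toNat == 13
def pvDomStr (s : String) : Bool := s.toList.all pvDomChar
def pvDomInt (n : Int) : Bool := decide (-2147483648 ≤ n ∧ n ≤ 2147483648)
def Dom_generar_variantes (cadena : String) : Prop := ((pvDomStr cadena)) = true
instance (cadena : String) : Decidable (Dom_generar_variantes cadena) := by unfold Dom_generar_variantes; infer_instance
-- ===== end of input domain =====

-- B replaces itertools.product over a per-character options list by binary counting:
-- each mask in range(2**m) selects by its bits which substitutable characters to replace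
-- (objective: alternative algorithm, same cost).

-- ===== PORT A =====
-- itertools.product(*opciones), ported as the standard recursive cartesian product
-- (first list varies slowest, matching product's ordering)
def pyProduct : List (List String) → List (List String)
  | [] => [[]]
  | o :: rest => o.flatMap (fun x => (pyProduct rest).map (fun v => x :: v))

def generar_variantes (cadena : String) : List String :=
  let cambios : PySem.Dict Char (List String) :=
    PySem.Dict.ofList [('e', ["e", "3"]), ('i', ["i", "1"]), ('o', ["o", "0"])]
  let opciones : List (List String) :=
    cadena.toList.foldl (fun acc char =>
      if (cambios.get? char).isSome then          -- char in cambios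
        acc ++ [cambios.getD char []]             -- opciones.append(cambios[char])
      else
        acc ++ [[String.ofList [char]]]) []       -- opciones.append([char])
  (pyProduct opciones).map (fun variacion => String.join variacion)  -- ''.join(variacion)

-- ===== PORT B =====
-- 2 ** m and 2 ** bits are ported via .toNat exponents: m and bits are never negative
-- where used (m is a count; bits counts the substitutable characters still ahead), so
-- this is exact.
def generar_variantes_alt (cadena : String) : List String :=
  let m : Int := cadena.toList.foldl (fun m ch =>
    if ch ∈ (['e', 'i', 'o'] : List Char) then m + 1 else m) 0      -- ch in 'eio'
  (PySem.List.pyRange 0 ((2 : Int) ^ m.toNat) 1).foldl (fun out mask =>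
    let bp : Int × List Char := cadena.toList.foldl (fun (st : Int × List Char) ch =>
      if ch ∈ (['e', 'i', 'o'] : List Char) then
        let bits := st.1 - 1
        if PySem.Int.mod (PySem.Int.floordiv mask ((2 : Int) ^ bits.toNat)) 2 ≠ 0 then
          (bits, st.2 ++ [if ch = 'e' then '3' else if ch = 'i' then '1' else '0'])
        else
          (bits, st.2 ++ [ch])
      else (st.1, st.2 ++ [ch])) (m, [])
    out ++ [String.ofList bp.2]) []                                 -- ''.join(piece)

-- ===== PRECONDITION & SPEC =====
def Spec_generar_variantes (cadena : String) (out : List String) : Prop := out = generar_variantes_alt cadena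
instance (cadena : String) (out : List String) : Decidable (Spec_generar_variantes cadena out) := by unfold Spec_generar_variantes; infer_instance

-- ===== CLAIM (what is proved, stated in full; the proofs are below) =====
def Claim_equal_generar_variantes : Prop := ∀ (cadena : String), Dom_generar_variantes cadena → Spec_generar_variantes cadena (generar_variantes cadena)

-- ===== LEMMAS AND PROOFS =====

-- A's per-character option list, as a standalone function (used only in the proofs)
def pvOpts (c : Char) : List String :=
  if c = 'e' then ["e", "3"]
  else if c = 'i' then ["i", "1"]
  else if c = 'o' then ["o", "0"]
  else [String.ofList [c]]

def pvRep (c : Char) : Char := if c = 'e' then '3' else if c = 'i' then '1' else '0'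

def pvCnt (l : List Char) : Nat := l.countP (fun c => decide (c ∈ (['e', 'i', 'o'] : List Char)))

-- the string rendered for a given mask (bit for a substitutable char = cnt of the tail)
def pvRender : List Char → Nat → List Char
  | [], _ => []
  | c :: t, mask =>
    if c ∈ (['e', 'i', 'o'] : List Char) then
      (if mask / 2 ^ pvCnt t % 2 = 1 then pvRep c else c) :: pvRender t mask
    else c :: pvRender t mask

theorem pvOpts_eq (c : Char) :
    pvOpts c = if c ∈ (['e', 'i', 'o'] : List Char)
               then [String.ofList [c], String.ofList [pvRep c]]
               else [String.ofList [c]] := by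
  by_cases he : c = 'e' <;> by_cases hi : c = 'i' <;> by_cases ho : c = 'o' <;>
    simp_all [pvOpts, pvRep]

-- A's branch on the cambios dict computes exactly pvOpts
theorem pvOptsA_eq (c : Char) :
    (if ((PySem.Dict.ofList [('e', ["e", "3"]), ('i', ["i", "1"]), ('o', ["o", "0"])] : PySem.Dict Char (List String)).get? c).isSome then
       (PySem.Dict.ofList [('e', ["e", "3"]), ('i', ["i", "1"]), ('o', ["o", "0"])] : PySem.Dict Char (List String)).getD c []
     else [String.ofList [c]]) = pvOpts c := by
  by_cases he : c = 'e' <;> by_cases hi : c = 'i' <;> by_cases ho : c = 'o' <;>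
    simp_all [pvOpts, PySem.Dict.ofList, PySem.Dict.getD, PySem.Dict.get?,
      PySem.Dict.insert, PySem.Dict.update, PySem.Dict.empty]
  intro h
  rcases h with h|h|h <;> subst h <;> simp_all

-- A's accumulating loop builds the map of pvOpts
theorem pvOpcionesA (l : List Char) (acc : List (List String)) :
    l.foldl (fun acc char =>
      if ((PySem.Dict.ofList [('e', ["e", "3"]), ('i', ["i", "1"]), ('o', ["o", "0"])] : PySem.Dict Char (List String)).get? char).isSome then
        acc ++ [(PySem.Dict.ofList [('e', ["e", "3"]), ('i', ["i", "1"]), ('o', ["o", "0"])] : PySem.Dict Char (List String)).getD char []]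
      else acc ++ [[String.ofList [char]]]) acc = acc ++ l.map pvOpts := by
  induction l generalizing acc with
  | nil => simp
  | cons c l ih =>
    have h := pvOptsA_eq c
    simp only [List.foldl_cons, List.map_cons]
    by_cases hc : ((PySem.Dict.ofList [('e', ["e", "3"]), ('i', ["i", "1"]), ('o', ["o", "0"])] : PySem.Dict Char (List String)).get? c).isSome
    · rw [if_pos hc] at h ⊢; rw [ih, h]; simp
    · rw [if_neg hc] at h ⊢; rw [ih, h]; simp

-- folding ++ from an arbitrary seed (String.join's foldl) factors the seed out
theorem pvFoldl_append_str (x : List String) (a : String) :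
    x.foldl (fun r s => r ++ s) a = a ++ x.foldl (fun r s => r ++ s) "" := by
  induction x generalizing a with
  | nil => simp
  | cons h t ih => rw [List.foldl_cons, ih, List.foldl_cons, ih ("" ++ h)]; simp [String.append_assoc]

-- ''.join splits off its head string
theorem pvJoin_cons (x : String) (v : List String) :
    String.join (x :: v) = x ++ String.join v := by
  rw [String.join, String.join, List.foldl_cons, pvFoldl_append_str]
  simp

-- the joined product, one character at a time
theorem pvJoin_product_cons (c : Char) (l : List Char) :
    (pyProduct ((c :: l).map pvOpts)).map String.join
      = (pvOpts c).flatMap (fun o => ((pyProduct (l.map pvOpts)).map String.join).map (fun s => o ++ s)) := by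
  simp [pyProduct, List.map_flatMap, List.map_map, Function.comp_def, pvJoin_cons]

theorem pvCnt_cons_pos {c : Char} (t : List Char) (hc : c ∈ (['e', 'i', 'o'] : List Char)) :
    pvCnt (c :: t) = pvCnt t + 1 := by
  simp only [pvCnt, List.countP_cons, decide_eq_true hc]
  simp

theorem pvCnt_cons_neg {c : Char} (t : List Char) (hc : c ∉ (['e', 'i', 'o'] : List Char)) :
    pvCnt (c :: t) = pvCnt t := by
  simp only [pvCnt, List.countP_cons, decide_eq_false hc]
  simp

-- a high bit does not affect lower binary digits
theorem pvBit_high {k m : Nat} (hk : k < m) (r : Nat) :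
    (2 ^ m + r) / 2 ^ k % 2 = r / 2 ^ k % 2 := by
  have h1 : 2 ^ m = 2 ^ k * (2 * 2 ^ (m - k - 1)) := by
    rw [← pow_succ', ← pow_add]
    congr 1
    omega
  rw [h1, Nat.mul_add_div (pow_pos (by norm_num) k)]
  omega

-- pvRender ignores bits at or above pvCnt of the list
theorem pvRender_high {t : List Char} {m : Nat} (h : pvCnt t ≤ m) (r : Nat) :
    pvRender t (2 ^ m + r) = pvRender t r := by
  induction t with
  | nil => rfl
  | cons c t ih =>
    by_cases hc : c ∈ (['e', 'i', 'o'] : List Char)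
    · rw [pvCnt_cons_pos t hc] at h
      simp only [pvRender, if_pos hc]
      rw [pvBit_high (by omega) r, ih (by omega)]
    · rw [pvCnt_cons_neg t hc] at h
      simp only [pvRender, if_neg hc]
      rw [ih h]

theorem pvOfList_append (a b : List Char) :
    String.ofList a ++ String.ofList b = String.ofList (a ++ b) := String.ofList_append.symm

-- the low 2^m masks keep a top-bit-0 character, the high ones replace it
theorem pvDiv_low {mask m : Nat} (h : mask < 2 ^ m) : mask / 2 ^ m % 2 = 0 := by
  rw [Nat.div_eq_of_lt h]

theorem pvDiv_high {k m : Nat} (h : k < 2 ^ m) : (2 ^ m + k) / 2 ^ m % 2 = 1 := by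
  have h1 : (2 ^ m * 1 + k) / 2 ^ m = 1 + k / 2 ^ m := Nat.mul_add_div (pow_pos (by norm_num) m) 1 k
  rw [mul_one, Nat.div_eq_of_lt h] at h1
  rw [h1]

-- main bridge: the joined cartesian product is binary counting over pvRender
theorem pvMain (l : List Char) :
    (pyProduct (l.map pvOpts)).map String.join
      = (List.range (2 ^ pvCnt l)).map (fun mask => String.ofList (pvRender l mask)) := by
  induction l with
  | nil => simp [pyProduct, pvCnt, pvRender, String.join, String.ofList_nil]
  | cons c t ih =>
    rw [pvJoin_product_cons, ih, pvOpts_eq]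
    by_cases hc : c ∈ (['e', 'i', 'o'] : List Char)
    · rw [pvCnt_cons_pos t hc, if_pos hc]
      rw [pow_succ, mul_two, List.range_add, List.map_append, List.map_map]
      simp only [List.flatMap_cons, List.flatMap_nil, List.map_map, List.append_nil]
      congr 1
      · apply List.map_congr_left
        intro mask hm
        rw [List.mem_range] at hm
        simp only [Function.comp_def, pvRender, if_pos hc, pvDiv_low hm, pvOfList_append]
        simp
      · apply List.map_congr_left
        intro k hk
        rw [List.mem_range] at hk
        simp only [Function.comp_def, pvRender, if_pos hc, pvDiv_high hk,
          pvRender_high (le_refl (pvCnt t)) k, pvOfList_append]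
        simp
    · rw [pvCnt_cons_neg t hc, if_neg hc]
      simp only [List.flatMap_cons, List.flatMap_nil, List.map_map, List.append_nil]
      apply List.map_congr_left
      intro mask _
      simp only [Function.comp_def, pvRender, if_neg hc, pvOfList_append]
      simp

-- B's character loop with correct starting bits computes pvRender
theorem pvFoldB_inner (mask : Nat) (l : List Char) (piece : List Char) :
    l.foldl (fun (st : Int × List Char) ch =>
      if ch ∈ (['e', 'i', 'o'] : List Char) then
        let bits := st.1 - 1
        if PySem.Int.mod (PySem.Int.floordiv ((mask : Int)) ((2 : Int) ^ bits.toNat)) 2 ≠ 0 then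
          (bits, st.2 ++ [if ch = 'e' then '3' else if ch = 'i' then '1' else '0'])
        else
          (bits, st.2 ++ [ch])
      else (st.1, st.2 ++ [ch])) ((pvCnt l : Int), piece)
      = (0, piece ++ pvRender l mask) := by
  induction l generalizing piece with
  | nil => simp [pvCnt, pvRender]
  | cons c t ih =>
    by_cases hc : c ∈ (['e', 'i', 'o'] : List Char)
    · rw [pvCnt_cons_pos t hc]
      simp only [List.foldl_cons, if_pos hc]
      have hbits : ((pvCnt t : Int) + 1 - 1) = (pvCnt t : Int) := by ring
      have htn : ((pvCnt t : Int)).toNat = pvCnt t := Int.toNat_natCast _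
      have hfd : PySem.Int.floordiv ((mask : Int)) ((2 : Int) ^ pvCnt t)
          = ((mask / 2 ^ pvCnt t : Nat) : Int) := by
        have := PySem.Int.floordiv_natCast mask (2 ^ pvCnt t)
        push_cast at this ⊢
        exact this
      have hmod : PySem.Int.mod ((mask / 2 ^ pvCnt t : Nat) : Int) 2
          = ((mask / 2 ^ pvCnt t % 2 : Nat) : Int) := by
        have := PySem.Int.mod_natCast (mask / 2 ^ pvCnt t) 2
        push_cast at this ⊢
        exact this
      push_cast
      rw [hbits, htn, hfd, hmod]
      by_cases hb : mask / 2 ^ pvCnt t % 2 = 1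
      · rw [if_pos (by omega : ((mask / 2 ^ pvCnt t % 2 : Nat) : Int) ≠ 0)]
        rw [ih]
        simp only [pvRender, if_pos hc, if_pos hb]
        have hrep : (if c = 'e' then '3' else if c = 'i' then '1' else '0') = pvRep c := rfl
        rw [hrep]
        simp
      · have hb0 : mask / 2 ^ pvCnt t % 2 = 0 := by omega
        rw [if_neg (by simp [hb0] : ¬ ((mask / 2 ^ pvCnt t % 2 : Nat) : Int) ≠ 0)]
        rw [ih]
        simp only [pvRender, if_pos hc, if_neg (by omega : ¬ mask / 2 ^ pvCnt t % 2 = 1)]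
        simp
    · rw [pvCnt_cons_neg t hc]
      simp only [List.foldl_cons, if_neg hc]
      rw [ih]
      simp only [pvRender, if_neg hc]
      simp

-- B's count loop computes pvCnt
theorem pvCountB (l : List Char) (a : Int) :
    l.foldl (fun m ch => if ch ∈ (['e', 'i', 'o'] : List Char) then m + 1 else m) a
      = a + (pvCnt l : Int) := by
  induction l generalizing a with
  | nil => simp [pvCnt]
  | cons c t ih =>
    simp only [List.foldl_cons]
    by_cases hc : c ∈ (['e', 'i', 'o'] : List Char)
    · rw [if_pos hc, ih, pvCnt_cons_pos t hc]
      push_cast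
      ring
    · rw [if_neg hc, ih, pvCnt_cons_neg t hc]

-- appending fold is map
theorem pvFoldl_append_map {α β : Type} (l : List α) (f : α → β) (a : List β) :
    l.foldl (fun out x => out ++ [f x]) a = a ++ l.map f := by
  induction l generalizing a with
  | nil => simp
  | cons c t ih => simp [ih]

-- ===== VERDICT (by name: the statement is the Claim_ definition above) =====
theorem generar_variantes_spec : Claim_equal_generar_variantes := by
  intro cadena _
  show generar_variantes cadena = generar_variantes_alt cadena
  simp only [generar_variantes, generar_variantes_alt]
  rw [pvOpcionesA cadena.toList [], List.nil_append, pvMain]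
  rw [pvCountB cadena.toList 0, zero_add]
  have htn : ((pvCnt cadena.toList : Int)).toNat = pvCnt cadena.toList := Int.toNat_natCast _
  rw [htn]
  have hpow : ((2 : Int) ^ pvCnt cadena.toList) = ((2 ^ pvCnt cadena.toList : Nat) : Int) := by
    push_cast; ring
  rw [hpow, PySem.List.pyRange_zero_natCast]
  rw [pvFoldl_append_map, List.nil_append, List.map_map]
  apply List.map_congr_left
  intro k _
  simp only [Function.comp_def]
  rw [pvFoldB_inner k cadena.toList []]
  simp
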